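-- pv_equiv track=rewrite | github.com/brk-a/DSA | 0x01_dsa/39-find_zero_with_farthest_one.py | find_zero_with_fartjest_ones_one_var
-- ===== SOURCE A (Python) =====
-- def find_zero_with_fartjest_ones_one_var(s: str) -> int:
--     if not isinstance(s, str) or len(s) == 0:
--         return -1
--
--     n = len(s)
--     INF = n + 1
--
--     # distance to nearest 1 on the left
--     left = [INF] * n
--     last_one = -INF
--     for i in range(n):
--         if s[i] == '1':
--             last_one = i
--         if last_one != -INF:
--             left[i] = i - last_one
--
--     # distance to nearest 1 on the right
--     right = [INF] * n
--     last_one = INF * 2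
--     for i in range(n - 1, -1, -1):
--         if s[i] == '1':
--             last_one = i
--         if last_one < INF * 2:
--             right[i] = last_one - i
--
--     # if there are no ones at all
--     if all(d == INF for d in left) and all(d == INF for d in right):
--         return -1
--
--     result = -1
--     for i, ch in enumerate(s):
--         if ch == '0':
--             nearest = min(left[i], right[i])
--             result = max(result, nearest)
--
--     return result
-- ===== SOURCE B (Python) =====
-- def find_zero_with_fartjest_ones_one_var(s: str) -> int:
--     if not isinstance(s, str) or len(s) == 0:
--         return -1
--     ones = [j for j, c in enumerate(s) if c == '1']
--     if not ones:
--         return -1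
--     result = -1
--     for i, ch in enumerate(s):
--         if ch == '0':
--             result = max(result, min(abs(i - j) for j in ones))
--     return result
-- ===== Notes on version B (the rewrite author's own statement) =====
-- stated objective: alternative
-- what changed: Replaces A's two prefix/suffix nearest-one distance arrays plus an all-INF scan with a direct computation: collect the positions of ones once, return -1 if there are none, then for each zero take the minimum absolute distance to a one-position and keep the running maximum.
import Mathlib
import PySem

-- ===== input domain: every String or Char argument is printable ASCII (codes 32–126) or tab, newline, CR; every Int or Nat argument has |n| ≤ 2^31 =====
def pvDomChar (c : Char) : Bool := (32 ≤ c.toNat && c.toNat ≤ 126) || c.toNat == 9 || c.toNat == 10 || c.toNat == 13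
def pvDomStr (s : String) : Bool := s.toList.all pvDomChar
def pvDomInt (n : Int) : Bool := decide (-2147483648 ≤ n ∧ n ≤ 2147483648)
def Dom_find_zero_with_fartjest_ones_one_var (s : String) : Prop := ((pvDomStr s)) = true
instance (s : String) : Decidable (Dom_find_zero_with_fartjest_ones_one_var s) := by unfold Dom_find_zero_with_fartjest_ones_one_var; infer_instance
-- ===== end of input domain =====

-- B replaces A's two prefix/suffix distance-array passes and all-INF scan by collecting the
-- one-positions once and taking, for each zero, the minimum absolute distance to a one
-- (alternative decomposition; a timing run measured B faster on its generated inputs).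

-- ===== PORT A =====
-- the 'left' array loop: entry i is i - last_one when a one has been seen, else INF
def pvLeftGo (cs : List Char) (i lastOne inf : Int) : List Int :=
  match cs with
  | [] => []
  | c :: rest =>
    let lo := if c == '1' then i else lastOne
    (if lo ≠ -inf then i - lo else inf) :: pvLeftGo rest (i + 1) lo inf

-- the 'right' array loop (runs from the high indices down; the recursive call processes the
-- suffix first and hands back its last_one state, exactly like Python's downward loop)
def pvRightGo (cs : List Char) (i inf : Int) : List Int × Int :=
  match cs with
  | [] => ([], inf * 2)
  | c :: rest =>
    let pr := pvRightGo rest (i + 1) inf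
    let lo := if c == '1' then i else pr.2
    ((if lo < inf * 2 then lo - i else inf) :: pr.1, lo)

def find_zero_with_fartjest_ones_one_var (s : String) : Int :=
  let cs := s.toList
  if cs.length = 0 then -1
  else
    let n : Int := cs.length
    let inf : Int := n + 1
    let left := pvLeftGo cs 0 (-inf) inf
    let right := (pvRightGo cs 0 inf).1
    if left.all (fun d => d == inf) && right.all (fun d => d == inf) then -1
    else
      (PySem.List.enumerate cs).foldl (fun result p =>
        if p.2 == '0' then
          max result (min (PySem.List.pyGetD left p.1 inf) (PySem.List.pyGetD right p.1 inf))
        else result) (-1)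

-- ===== PORT B =====
-- ones = [j for j, c in enumerate(s) if c == '1']
def pvOnes (cs : List Char) : List Int :=
  ((PySem.List.enumerate cs).filter (fun p => p.2 == '1')).map (fun p => p.1)

def find_zero_with_fartjest_ones_one_var_alt (s : String) : Int :=
  let cs := s.toList
  if cs.length = 0 then -1
  else
    match pvOnes cs with
    | [] => -1
    | o :: os =>
      (PySem.List.enumerate cs).foldl (fun result p =>
        if p.2 == '0' then
          max result ((os.map (fun j => |p.1 - j|)).foldl min |p.1 - o|)
        else result) (-1)

-- ===== PRECONDITION & SPEC =====
def Spec_find_zero_with_fartjest_ones_one_var (s : String) (out : Int) : Prop := out = find_zero_with_fartjest_ones_one_var_alt s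
instance (s : String) (out : Int) : Decidable (Spec_find_zero_with_fartjest_ones_one_var s out) := by unfold Spec_find_zero_with_fartjest_ones_one_var; infer_instance

-- ===== CLAIM (what is proved, stated in full; the proofs are below) =====
def Claim_equal_find_zero_with_fartjest_ones_one_var : Prop := ∀ (s : String), Dom_find_zero_with_fartjest_ones_one_var s → Spec_find_zero_with_fartjest_ones_one_var s (find_zero_with_fartjest_ones_one_var s)

-- ===== LEMMAS AND PROOFS =====

-- positions of '1' in cs when enumeration starts at i0 (pvOnes cs = pvOnesE cs 0)
def pvOnesE (cs : List Char) (i0 : Int) : List Int :=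
  ((PySem.List.enumerate cs i0).filter (fun p => p.2 == '1')).map (fun p => p.1)

lemma pvOnes_eq (cs : List Char) : pvOnes cs = pvOnesE cs 0 := rfl

lemma pvOnesE_nil (i0 : Int) : pvOnesE [] i0 = [] := rfl

lemma pvOnesE_cons (c : Char) (r : List Char) (i0 : Int) :
    pvOnesE (c :: r) i0 =
      if c = '1' then i0 :: pvOnesE r (i0 + 1) else pvOnesE r (i0 + 1) := by
  simp only [pvOnesE, PySem.List.enumerate_cons, List.filter_cons]
  by_cases h : c = '1' <;> simp [h]

lemma mem_pvOnesE {j : Int} {cs : List Char} {i0 : Int} (h : j ∈ pvOnesE cs i0) :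
    i0 ≤ j ∧ j < i0 + cs.length := by
  induction cs generalizing i0 with
  | nil => simp [pvOnesE_nil] at h
  | cons c r ih =>
    rw [pvOnesE_cons] at h
    simp only [List.length_cons]
    by_cases hc : c = '1'
    · rw [if_pos hc] at h
      rcases List.mem_cons.1 h with h | h
      · subst h; push_cast; omega
      · have := ih h; push_cast at this ⊢; omega
    · rw [if_neg hc] at h
      have := ih h; push_cast at this ⊢; omega

lemma pairwise_pvOnesE (cs : List Char) (i0 : Int) :
    (pvOnesE cs i0).Pairwise (· < ·) := by
  induction cs generalizing i0 with
  | nil => simp [pvOnesE_nil]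
  | cons c r ih =>
    rw [pvOnesE_cons]
    by_cases hc : c = '1' <;> simp [hc]
    · exact ⟨fun j hj => by have := mem_pvOnesE hj; omega, ih (i0 + 1)⟩
    · exact ih (i0 + 1)

lemma pvOnesE_append (xs ys : List Char) (i0 : Int) :
    pvOnesE (xs ++ ys) i0 = pvOnesE xs i0 ++ pvOnesE ys (i0 + xs.length) := by
  simp [pvOnesE, PySem.List.enumerate_append, List.filter_append]

-- a one at index k of cs puts i0 + k in pvOnesE
lemma mem_pvOnesE_iff (cs : List Char) (i0 j : Int) :
    j ∈ pvOnesE cs i0 ↔ ∃ (k : Nat) (h : k < cs.length), j = i0 + k ∧ cs[k] = '1' := by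
  simp only [pvOnesE, List.mem_map, List.mem_filter, PySem.List.mem_enumerate_iff]
  constructor
  · rintro ⟨p, ⟨⟨k, hk, rfl⟩, hp⟩, rfl⟩
    exact ⟨k, hk, rfl, by simpa using hp⟩
  · rintro ⟨k, hk, rfl, h1⟩
    exact ⟨(i0 + k, cs[k]), ⟨⟨k, hk, rfl⟩, by simpa using h1⟩, rfl⟩

-- characterization of A's left array
lemma pvLeftGo_length (cs : List Char) (i0 lo inf : Int) :
    (pvLeftGo cs i0 lo inf).length = cs.length := by
  induction cs generalizing i0 lo with
  | nil => rfl
  | cons c r ih => simp [pvLeftGo, ih]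

lemma pvLeftGo_getElem? (cs : List Char) (i0 lo inf : Int) (k : Nat)
    (hk : k < cs.length) (h0 : -inf < i0) :
    (pvLeftGo cs i0 lo inf)[k]? =
      some (match (pvOnesE (cs.take (k + 1)) i0).getLast? with
            | some j => (i0 + k) - j
            | none => if lo ≠ -inf then (i0 + k) - lo else inf) := by
  induction cs generalizing i0 lo k with
  | nil => simp at hk
  | cons c r ih =>
    simp only [pvLeftGo]
    cases k with
    | zero =>
      simp only [List.getElem?_cons_zero, List.take_succ_cons, List.take_zero,
        pvOnesE_cons, pvOnesE_nil]
      by_cases hc : c = '1'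
      · simp only [hc, beq_self_eq_true, if_true, List.getLast?_singleton]
        have : i0 ≠ -inf := by omega
        simp [this]
      · simp only [hc, beq_iff_eq, if_false, List.getLast?_nil]
        norm_num
    | succ k =>
      simp only [List.getElem?_cons_succ, List.take_succ_cons, pvOnesE_cons]
      have hk' : k < r.length := by simpa using hk
      by_cases hc : c = '1'
      · simp only [hc, beq_self_eq_true, if_true]
        rw [ih (i0 + 1) i0 k hk' (by omega)]
        rcases hT : (pvOnesE (r.take (k + 1)) (i0 + 1)).getLast? with _ | j
        · have : (i0 :: pvOnesE (r.take (k + 1)) (i0 + 1)).getLast? = some i0 := by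
            cases hL : pvOnesE (r.take (k + 1)) (i0 + 1) with
            | nil => simp
            | cons a t => simp [hL] at hT
          rw [this]
          have hi : i0 ≠ -inf := by omega
          simp only [hi, ne_eq, not_false_eq_true, if_true]
          congr 1; push_cast; ring
        · have : (i0 :: pvOnesE (r.take (k + 1)) (i0 + 1)).getLast? = some j := by
            cases hL : pvOnesE (r.take (k + 1)) (i0 + 1) with
            | nil => simp [hL] at hT
            | cons a t => rw [hL] at hT; rw [List.getLast?_cons_cons]; exact hT
          rw [this]
          congr 1; push_cast; ring
      · simp only [hc, beq_iff_eq, if_false]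
        rw [ih (i0 + 1) lo k hk' (by omega)]
        rcases hT : (pvOnesE (r.take (k + 1)) (i0 + 1)).getLast? with _ | j
        · by_cases hlo : lo = -inf
          · simp [hlo]
          · simp only [hlo, ne_eq, not_false_eq_true, if_true]
            congr 1; push_cast; ring
        · congr 1; push_cast; ring

-- characterization of A's right loop state and array
lemma pvRightGo_snd (cs : List Char) (i0 inf : Int) :
    (pvRightGo cs i0 inf).2 = ((pvOnesE cs i0).head?).getD (inf * 2) := by
  induction cs generalizing i0 with
  | nil => rfl
  | cons c r ih =>
    rw [pvOnesE_cons]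
    by_cases hc : c = '1' <;> simp [pvRightGo, hc, ih]

lemma pvRightGo_length (cs : List Char) (i0 inf : Int) :
    (pvRightGo cs i0 inf).1.length = cs.length := by
  induction cs generalizing i0 with
  | nil => rfl
  | cons c r ih => simp [pvRightGo, ih]

lemma pvRightGo_getElem? (cs : List Char) (i0 inf : Int) (k : Nat)
    (hk : k < cs.length) (hb : i0 + cs.length < inf * 2) :
    (pvRightGo cs i0 inf).1[k]? =
      some (match (pvOnesE (cs.drop k) (i0 + k)).head? with
            | some j => j - (i0 + k)
            | none => inf) := by
  induction cs generalizing i0 k with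
  | nil => simp at hk
  | cons c r ih =>
    simp only [pvRightGo]
    cases k with
    | zero =>
      simp only [List.getElem?_cons_zero, List.drop_zero, pvOnesE_cons]
      by_cases hc : c = '1'
      · simp only [hc, beq_self_eq_true, if_true, List.head?_cons]
        have : i0 < inf * 2 := by simp at hb; omega
        simp [this]
      · simp only [hc, beq_iff_eq, if_false, pvRightGo_snd]
        rcases hH : (pvOnesE r (i0 + 1)).head? with _ | j
        · simp [hH]
        · have hj : j ∈ pvOnesE r (i0 + 1) := List.mem_of_mem_head? (by rw [hH]; rfl)
          have hjb := mem_pvOnesE hj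
          have : j < inf * 2 := by simp at hb; omega
          simp [hH, this]
    | succ k =>
      simp only [List.getElem?_cons_succ, List.drop_succ_cons]
      have hk' : k < r.length := by simpa using hk
      rw [ih (i0 + 1) k hk' (by simp at hb ⊢; omega)]
      have harg : i0 + 1 + (k : Int) = i0 + ((k : Nat) + 1 : Nat) := by push_cast; ring
      rw [harg]

-- min over a nonempty list, as Python's min() computes it
lemma foldl_min_eq_of {a : Int} {l : List Int} {c : Int}
    (hmem : c ∈ a :: l) (hlb : ∀ x ∈ a :: l, c ≤ x) :
    l.foldl min a = c := by
  have h1 := PySem.List.foldl_min_le l a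
  have h2 := PySem.List.foldl_min_mem l a
  apply le_antisymm
  · rcases List.mem_cons.1 hmem with h | h
    · exact h ▸ h1.1
    · exact h1.2 c h
  · rcases h2 with h | h
    · rw [h]; exact hlb a (List.mem_cons_self ..)
    · exact hlb _ (List.mem_cons_of_mem _ h)

-- in a strictly increasing list the last element is the greatest, the head the least
lemma pvLast_max {l : List Int} (hp : l.Pairwise (· < ·)) {m : Int}
    (h : l.getLast? = some m) : ∀ x ∈ l, x ≤ m := by
  induction l with
  | nil => simp at h
  | cons a t ih =>
    intro x hx
    cases t with
    | nil =>
      simp only [List.getLast?_singleton, Option.some.injEq] at h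
      simp only [List.mem_singleton] at hx
      omega
    | cons b u =>
      rw [List.getLast?_cons_cons] at h
      rcases List.mem_cons.1 hx with rfl | hx'
      · have hm : m ∈ b :: u := List.mem_of_getLast? h
        have := (List.pairwise_cons.1 hp).1 m hm
        omega
      · exact ih (List.pairwise_cons.1 hp).2 h x hx'

lemma pvHead_min {l : List Int} (hp : l.Pairwise (· < ·)) {m : Int}
    (h : l.head? = some m) : ∀ x ∈ l, m ≤ x := by
  cases l with
  | nil => simp at h
  | cons a t =>
    simp only [List.head?_cons, Option.some.injEq] at h
    subst h
    intro x hx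
    rcases List.mem_cons.1 hx with rfl | hx'
    · omega
    · exact le_of_lt ((List.pairwise_cons.1 hp).1 x hx')

-- the pointwise fact: at a position k, min(left[k], right[k]) is the distance to the nearest one
lemma pv_pointwise (cs : List Char) (o : Int) (os : List Int) (k : Nat)
    (hk : k < cs.length) (hones : pvOnesE cs 0 = o :: os) :
    min (PySem.List.pyGetD (pvLeftGo cs 0 (-((cs.length : Int) + 1)) ((cs.length : Int) + 1)) (k : Int) ((cs.length : Int) + 1))
        (PySem.List.pyGetD (pvRightGo cs 0 ((cs.length : Int) + 1)).1 (k : Int) ((cs.length : Int) + 1)) =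
      (os.map (fun j => |(k : Int) - j|)).foldl min |(k : Int) - o| := by
  have hn0 : (0 : Int) ≤ (cs.length : Int) := by positivity
  set n : Int := (cs.length : Int) with hn
  set inf : Int := n + 1 with hinf
  set f : Int → Int := fun j => |(k : Int) - j| with hf
  have hfd : ∀ x, f x = |(k : Int) - x| := fun _ => rfl
  -- the two array entries
  have hLk := pvLeftGo_getElem? cs 0 (-inf) inf k hk (by omega)
  have hRk := pvRightGo_getElem? cs 0 inf k hk (by rw [← hn]; omega)
  have hL : PySem.List.pyGetD (pvLeftGo cs 0 (-inf) inf) (k : Int) inf =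
      (match (pvOnesE (cs.take (k + 1)) 0).getLast? with
       | some j => (0 + (k : Int)) - j
       | none => if (-inf : Int) ≠ -inf then (0 + (k : Int)) - (-inf) else inf) := by
    rw [PySem.List.pyGetD_natCast, List.getD_eq_getElem?_getD, hLk]; rfl
  have hR : PySem.List.pyGetD (pvRightGo cs 0 inf).1 (k : Int) inf =
      (match (pvOnesE (cs.drop k) (0 + (k : Int))).head? with
       | some j => j - (0 + (k : Int))
       | none => inf) := by
    rw [PySem.List.pyGetD_natCast, List.getD_eq_getElem?_getD, hRk]; rfl
  rw [hL, hR]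
  set P1 := pvOnesE (cs.take (k + 1)) 0 with hP1
  set P2 := pvOnesE (cs.drop (k + 1)) ((k : Int) + 1) with hP2
  set S := pvOnesE (cs.drop k) (0 + (k : Int)) with hSdef
  -- splits of the ones list
  have hlt1 : (cs.take (k + 1)).length = k + 1 := by rw [List.length_take]; omega
  have hsplit1 : pvOnesE cs 0 = P1 ++ P2 := by
    conv_lhs => rw [← List.take_append_drop (k + 1) cs]
    rw [pvOnesE_append, hlt1]
    congr 1
    · congr 1; push_cast; ring
  have hScons : S = (if cs[k] = '1' then ((0 : Int) + (k : Int)) :: P2 else P2) := by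
    rw [hSdef, List.drop_eq_getElem_cons hk, pvOnesE_cons]
    by_cases hck : cs[k] = '1' <;> simp only [hck, if_true, if_false]
    · congr 1; rw [hP2]; congr 1; ring
    · rw [hP2]; congr 1; ring
  have hSsub : pvOnesE cs 0 = pvOnesE (cs.take k) 0 ++ S := by
    conv_lhs => rw [← List.take_append_drop k cs]
    rw [pvOnesE_append]
    congr 2
    rw [List.length_take]; push_cast; omega
  -- bounds
  have hP1b : ∀ j ∈ P1, 0 ≤ j ∧ j ≤ (k : Int) := by
    intro j hj; have := mem_pvOnesE hj; rw [hlt1] at this; push_cast at this; omega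
  have hSb : ∀ j ∈ S, (k : Int) ≤ j ∧ j < n := by
    intro j hj; have := mem_pvOnesE hj
    rw [List.length_drop] at this; omega
  have honesb : ∀ j ∈ pvOnesE cs 0, 0 ≤ j ∧ j < n := by
    intro j hj; have := mem_pvOnesE hj; push_cast at this; omega
  -- each one is accounted for by the left segment or the right segment
  have hcover : ∀ j ∈ pvOnesE cs 0, j ∈ P1 ∨ j ∈ S := by
    intro j hj
    rcases List.mem_append.1 (hsplit1 ▸ hj) with h | h
    · exact Or.inl h
    · refine Or.inr ?_
      rw [hScons]
      by_cases hck : cs[k] = '1' <;> simp [hck, h]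
  -- lower-bound facts for the two candidate values
  have factL : ∀ l1, P1.getLast? = some l1 →
      l1 ∈ pvOnesE cs 0 ∧ (0 ≤ l1 ∧ l1 ≤ (k : Int)) ∧ ∀ j ∈ P1, (k : Int) - l1 ≤ f j := by
    intro l1 hg
    have hm : l1 ∈ P1 := List.mem_of_getLast? hg
    have hb := hP1b l1 hm
    refine ⟨hsplit1 ▸ List.mem_append.2 (Or.inl hm), hb, ?_⟩
    intro j hj
    have hjb := hP1b j hj
    have hle := pvLast_max (pairwise_pvOnesE _ _) hg j hj
    have : f j = (k : Int) - j := by rw [hfd]; exact abs_of_nonneg (by omega)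
    omega
  have factS : ∀ h, S.head? = some h →
      h ∈ pvOnesE cs 0 ∧ ((k : Int) ≤ h ∧ h < n) ∧ ∀ j ∈ S, h - (k : Int) ≤ f j := by
    intro h hg
    have hm : h ∈ S := List.mem_of_mem_head? (by rw [hg]; rfl)
    have hb := hSb h hm
    refine ⟨hSsub ▸ List.mem_append.2 (Or.inr hm), hb, ?_⟩
    intro j hj
    have hjb := hSb j hj
    have hle := pvHead_min (pairwise_pvOnesE _ _) hg j hj
    have : f j = j - (k : Int) := by rw [hfd, abs_sub_comm]; exact abs_of_nonneg (by omega)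
    omega
  -- the target list of distances is the distances over all ones
  have hcons : f o :: os.map f = (pvOnesE cs 0).map f := by rw [hones, List.map_cons]
  -- case analysis on the two neighbours
  rcases hg1 : P1.getLast? with _ | l1 <;> rcases hg2 : S.head? with _ | h
  · -- no ones at all: contradiction
    exfalso
    have hP1e : P1 = [] := by simpa using hg1
    have hSe : S = [] := by simpa using hg2
    rw [hsplit1, hP1e] at hones
    have : P2 = [] := by
      rw [hScons] at hSe
      by_cases hck : cs[k] = '1'
      · simp [hck] at hSe
      · simpa [hck] using hSe
    simp [this] at hones
  · -- only a right neighbour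
    obtain ⟨hmem, hb, hlb⟩ := factS h hg2
    have hP1e : P1 = [] := by simpa using hg1
    simp only [ne_eq, not_true_eq_false, if_false]
    have hval : min inf (h - (0 + (k : Int))) = f h := by
      have : f h = h - (k : Int) := by rw [hfd, abs_sub_comm]; exact abs_of_nonneg (by omega)
      omega
    rw [hval]
    refine (foldl_min_eq_of ?_ ?_).symm
    · rw [hcons]; exact List.mem_map_of_mem hmem
    · intro x hx
      rw [hcons] at hx
      rcases List.mem_map.1 hx with ⟨j, hj, rfl⟩
      rcases hcover j hj with hc | hc
      · rw [hP1e] at hc; simp at hc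
      · have := hlb j hc
        have hfh : f h = h - (k : Int) := by rw [hfd, abs_sub_comm]; exact abs_of_nonneg (by omega)
        omega
  · -- only a left neighbour
    obtain ⟨hmem, hb, hlb⟩ := factL l1 hg1
    have hSe : S = [] := by simpa using hg2
    have hval : min ((0 : Int) + (k : Int) - l1) inf = f l1 := by
      have : f l1 = (k : Int) - l1 := by rw [hfd]; exact abs_of_nonneg (by omega)
      omega
    rw [hval]
    refine (foldl_min_eq_of ?_ ?_).symm
    · rw [hcons]; exact List.mem_map_of_mem hmem
    · intro x hx
      rw [hcons] at hx
      rcases List.mem_map.1 hx with ⟨j, hj, rfl⟩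
      rcases hcover j hj with hc | hc
      · have := hlb j hc
        have hfl : f l1 = (k : Int) - l1 := by rw [hfd]; exact abs_of_nonneg (by omega)
        omega
      · rw [hSe] at hc; simp at hc
  · -- both neighbours exist
    obtain ⟨hmemL, hbL, hlbL⟩ := factL l1 hg1
    obtain ⟨hmemS, hbS, hlbS⟩ := factS h hg2
    show min ((0 : Int) + (k : Int) - l1) (h - (0 + (k : Int))) = _
    have hfl : f l1 = (k : Int) - l1 := by rw [hfd]; exact abs_of_nonneg (by omega)
    have hfh : f h = h - (k : Int) := by rw [hfd, abs_sub_comm]; exact abs_of_nonneg (by omega)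
    refine (foldl_min_eq_of ?_ ?_).symm
    · rw [hcons]
      rcases min_choice ((0 : Int) + (k : Int) - l1) (h - (0 + (k : Int))) with hmin | hmin <;> rw [hmin]
      · have : (0 : Int) + (k : Int) - l1 = f l1 := by omega
        rw [this]; exact List.mem_map_of_mem hmemL
      · have : h - ((0 : Int) + (k : Int)) = f h := by omega
        rw [this]; exact List.mem_map_of_mem hmemS
    · intro x hx
      rw [hcons] at hx
      rcases List.mem_map.1 hx with ⟨j, hj, rfl⟩
      rcases hcover j hj with hc | hc
      · have := hlbL j hc
        have hm := min_le_left ((0 : Int) + (k : Int) - l1) (h - (0 + (k : Int)))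
        omega
      · have := hlbS j hc
        have hm := min_le_right ((0 : Int) + (k : Int) - l1) (h - (0 + (k : Int)))
        omega

-- the all-INF guard of A holds exactly when there are no ones
lemma pv_guard_iff (cs : List Char) (hne : cs ≠ []) :
    ((pvLeftGo cs 0 (-((cs.length : Int) + 1)) ((cs.length : Int) + 1)).all (fun d => d == ((cs.length : Int) + 1)) &&
     ((pvRightGo cs 0 ((cs.length : Int) + 1)).1.all (fun d => d == ((cs.length : Int) + 1)))) = true ↔
    pvOnesE cs 0 = [] := by
  have hlen : 0 < cs.length := List.length_pos_iff.2 hne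
  set n : Int := (cs.length : Int) with hn
  set inf : Int := n + 1 with hinf
  constructor
  · intro hall
    rcases hO : pvOnesE cs 0 with _ | ⟨o, os⟩
    · rfl
    · exfalso
      have ho : o ∈ pvOnesE cs 0 := by rw [hO]; exact List.mem_cons_self ..
      obtain ⟨t, ht, rfl, h1⟩ := (mem_pvOnesE_iff cs 0 o).1 ho
      -- the left array has entry ≤ t < inf at index t
      have hLt := pvLeftGo_getElem? cs 0 (-inf) inf t ht (by omega)
      have htP1 : ((0 : Int) + t) ∈ pvOnesE (cs.take (t + 1)) 0 := by
        rw [mem_pvOnesE_iff]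
        exact ⟨t, by rw [List.length_take]; omega, rfl, by rw [List.getElem_take]; exact h1⟩
      rcases hg : (pvOnesE (cs.take (t + 1)) 0).getLast? with _ | l1
      · rw [List.getLast?_eq_none_iff] at hg
        rw [hg] at htP1; simp at htP1
      · have hl1 : l1 ∈ pvOnesE (cs.take (t + 1)) 0 := List.mem_of_getLast? hg
        have hl1b := mem_pvOnesE hl1
        rw [List.length_take] at hl1b
        have hvl : (pvLeftGo cs 0 (-inf) inf)[t]? = some ((0 : Int) + t - l1) := by
          rw [hLt, hg]
        have hmem : ((0 : Int) + t - l1) ∈ pvLeftGo cs 0 (-inf) inf :=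
          List.mem_of_getElem? hvl
        have hall1 := List.all_eq_true.1 (Bool.and_eq_true_iff.1 hall).1 _ hmem
        rw [beq_iff_eq] at hall1
        push_cast at hl1b
        omega
  · intro hO
    have hsplitAt : ∀ m : Nat, m ≤ cs.length →
        pvOnesE (cs.take m) 0 = [] ∧ pvOnesE (cs.drop m) (m : Int) = [] := by
      intro m hm
      have : pvOnesE cs 0 = pvOnesE (cs.take m) 0 ++ pvOnesE (cs.drop m) (m : Int) := by
        conv_lhs => rw [← List.take_append_drop m cs]
        rw [pvOnesE_append]
        congr 2
        rw [List.length_take]; push_cast; omega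
      rw [hO] at this
      exact ⟨(List.append_eq_nil_iff.1 this.symm).1, (List.append_eq_nil_iff.1 this.symm).2⟩
    rw [Bool.and_eq_true_iff]
    constructor
    · rw [List.all_eq_true]
      intro d hd
      obtain ⟨t, ht0, rfl⟩ := List.mem_iff_getElem.1 hd
      have ht : t < cs.length := by rw [pvLeftGo_length] at ht0; exact ht0
      have hLt := pvLeftGo_getElem? cs 0 (-inf) inf t ht (by omega)
      rw [(hsplitAt (t + 1) (by omega)).1] at hLt
      simp only [List.getLast?_nil] at hLt
      have hv : (pvLeftGo cs 0 (-inf) inf)[t] = inf := by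
        rw [List.getElem?_eq_getElem ht0] at hLt
        simpa using hLt
      rw [hv]
      exact beq_self_eq_true inf
    · rw [List.all_eq_true]
      intro d hd
      obtain ⟨t, ht0, rfl⟩ := List.mem_iff_getElem.1 hd
      have ht : t < cs.length := by rw [pvRightGo_length] at ht0; exact ht0
      have hRt := pvRightGo_getElem? cs 0 inf t ht (by rw [← hn]; omega)
      have hz : ((0 : Int) + t) = (t : Int) := by omega
      rw [hz, (hsplitAt t (by omega)).2] at hRt
      simp only [List.head?_nil] at hRt
      have hv : (pvRightGo cs 0 inf).1[t] = inf := by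
        rw [List.getElem?_eq_getElem ht0] at hRt
        simpa using hRt
      rw [hv]
      exact beq_self_eq_true inf

-- ===== VERDICT (by name: the statement is the Claim_ definition above) =====
theorem find_zero_with_fartjest_ones_one_var_spec : Claim_equal_find_zero_with_fartjest_ones_one_var := by
  intro s _
  unfold Spec_find_zero_with_fartjest_ones_one_var
  simp only [find_zero_with_fartjest_ones_one_var, find_zero_with_fartjest_ones_one_var_alt]
  by_cases hemp : s.toList.length = 0
  · simp [hemp]
  · simp only [if_neg hemp]
    have hne : s.toList ≠ [] := by
      intro h; rw [h] at hemp; exact hemp rfl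
    rcases hO : pvOnes s.toList with _ | ⟨o, os⟩
    · have hguard := (pv_guard_iff s.toList hne).2 (by rw [← pvOnes_eq]; exact hO)
      rw [if_pos hguard]
    · have honesne : pvOnesE s.toList 0 ≠ [] := by
        rw [← pvOnes_eq, hO]; simp
      have hguard : ¬ (((pvLeftGo s.toList 0 (-((s.toList.length : Int) + 1)) ((s.toList.length : Int) + 1)).all
            (fun d => d == ((s.toList.length : Int) + 1)) &&
          ((pvRightGo s.toList 0 ((s.toList.length : Int) + 1)).1.all
            (fun d => d == ((s.toList.length : Int) + 1)))) = true) :=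
        fun h => honesne ((pv_guard_iff _ hne).1 h)
      rw [if_neg hguard]
      refine PySem.List.foldl_congr_mem _ _ _ _ ?_
      intro acc p hp
      obtain ⟨k, hk, rfl⟩ := (PySem.List.mem_enumerate_iff _ _ _).1 hp
      by_cases hc : s.toList[k] = '0'
      · simp only [hc, beq_self_eq_true, if_true]
        simp only [zero_add]
        congr 1
        exact pv_pointwise s.toList o os k hk (by rw [← pvOnes_eq]; exact hO)
      · simp [hc]
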